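-- pv_equiv track=rewrite | github.com/huytq000605/CF-CP | Codeforces Round #753 (Div.3)/D.py | solve
-- ===== SOURCE A (Python) =====
-- def solve(arr, colors):
-- 	n = len(arr)
-- 	blue = []
-- 	red = []
-- 	# Greedy choose Blue for all small numbers and Red for all big numbers
-- 	for num, color in zip(arr, colors):
-- 		if color == "B":
-- 			blue.append(num)
-- 		else:
-- 			red.append(num)
-- 	blue.sort(reverse= True)
-- 	red.sort(reverse=True)
-- 	num = 1
-- 	while num <= n:
-- 		if blue:
-- 			if blue[-1] < num:
-- 				return "NO"
-- 			else:
-- 				blue.pop()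
-- 		else:
-- 			if red[-1] > num:
-- 				return "NO"
-- 			else:
-- 				red.pop()
-- 		num += 1
-- 	return "YES"
-- ===== SOURCE B (Python) =====
-- def solve(arr, colors):
--     pairs = list(zip(arr, colors))
--     blue = sorted(v for v, c in pairs if c == "B")
--     red = sorted(v for v, c in pairs if c != "B")
--     b = len(blue)
--     if any(v < i + 1 for i, v in enumerate(blue)):
--         return "NO"
--     if any(v > b + 1 + j for j, v in enumerate(red)):
--         return "NO"
--     return "YES"
-- ===== Notes on version B (the rewrite author's own statement) =====
-- stated objective: simpler
-- what changed: Replaces A's counter-threaded while-loop that pops from two descending-sorted stacks by two independent index-comparison passes over the ascending-sorted colour classes (blue[i] >= i+1 and red[j] <= b+1+j).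
-- outside the precondition, e.g. on solve([2, 9], ['R']): A returns 'NO', B returns 'NO'; on solve([1, 9], ['R']): A raises IndexError, B returns 'YES'
import Mathlib
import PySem

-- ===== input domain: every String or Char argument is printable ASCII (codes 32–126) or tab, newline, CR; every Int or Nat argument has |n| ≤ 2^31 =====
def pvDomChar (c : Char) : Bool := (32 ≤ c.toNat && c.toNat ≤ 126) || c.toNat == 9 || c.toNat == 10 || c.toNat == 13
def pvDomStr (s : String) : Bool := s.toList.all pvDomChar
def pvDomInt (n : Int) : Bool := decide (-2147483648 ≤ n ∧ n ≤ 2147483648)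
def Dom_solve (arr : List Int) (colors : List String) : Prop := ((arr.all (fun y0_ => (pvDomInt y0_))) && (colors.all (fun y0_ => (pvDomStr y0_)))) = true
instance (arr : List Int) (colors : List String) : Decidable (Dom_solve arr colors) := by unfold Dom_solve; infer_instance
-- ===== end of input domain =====

-- B replaces A's counter-threaded pop loop by two index-comparison passes over the
-- ascending-sorted colour classes (objective: simpler; no asymptotic change).

-- ===== PORT A =====
-- the while loop: fuel = n, state (num, blue, red); blue[-1] / .pop() are getLastD / dropLast
def solveLoop : Nat → Int → List Int → List Int → String
  | 0, _, _, _ => "YES"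
  | fuel+1, num, blue, red =>
    if !blue.isEmpty then
      if blue.getLastD 0 < num then "NO"
      else solveLoop fuel (num+1) blue.dropLast red
    else
      match red.getLast? with
      | none => ""          -- Python raises IndexError here; excluded by Pre_solve
      | some x =>
        if x > num then "NO"
        else solveLoop fuel (num+1) blue red.dropLast

def solve (arr : List Int) (colors : List String) : String :=
  let n := arr.length
  let br := (arr.zip colors).foldl
      (fun (p : List Int × List Int) nc =>
        if nc.2 == "B" then (p.1 ++ [nc.1], p.2) else (p.1, p.2 ++ [nc.1]))
      ([], [])
  let blue := PySem.List.sorted br.1 (fun x => x) true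
  let red := PySem.List.sorted br.2 (fun x => x) true
  solveLoop n 1 blue red

-- ===== PORT B =====
def solve_alt (arr : List Int) (colors : List String) : String :=
  let pairs := arr.zip colors
  let blue := PySem.List.sorted ((pairs.filter (fun p => p.2 == "B")).map Prod.fst) (fun x => x) false
  let red := PySem.List.sorted ((pairs.filter (fun p => p.2 != "B")).map Prod.fst) (fun x => x) false
  let b : Int := blue.length
  if (PySem.List.enumerate blue).any (fun p => p.2 < p.1 + 1) then "NO"
  else if (PySem.List.enumerate red).any (fun p => p.2 > b + 1 + p.1) then "NO"
  else "YES"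

-- ===== PRECONDITION & SPEC =====
-- Pre_ excludes colors shorter than arr: there A either raises IndexError after
-- exhausting both colour lists or returns "NO" only because the pop loop happened
-- to fail before running out — an accident of A's implementation.
def Pre_solve (arr : List Int) (colors : List String) : Prop := arr.length ≤ colors.length
instance (arr : List Int) (colors : List String) : Decidable (Pre_solve arr colors) := by unfold Pre_solve; infer_instance
def pvWitness_solve : List Int × List String := ([1, 3, 1], ["B", "R", "B"])

def Spec_solve (arr : List Int) (colors : List String) (out : String) : Prop := out = solve_alt arr colors
instance (arr : List Int) (colors : List String) (out : String) : Decidable (Spec_solve arr colors out) := by unfold Spec_solve; infer_instance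

-- ===== CLAIM (what is proved, stated in full; the proofs are below) =====
def Claim_equal_solve : Prop := ∀ (arr : List Int) (colors : List String), Dom_solve arr colors → Pre_solve arr colors → Spec_solve arr colors (solve arr colors)

-- ===== LEMMAS AND PROOFS =====

-- recursive forms of B's two index checks (proof-side helpers)
def chk : Int → List Int → Bool
  | _, [] => true
  | num, x :: t => !(x < num) && chk (num+1) t

def chkR : Int → List Int → Bool
  | _, [] => true
  | num, x :: t => !(x > num) && chkR (num+1) t

lemma loopR (rR : List Int) : ∀ (num : Int),
    solveLoop rR.length num [] rR.reverse = if chkR num rR then "YES" else "NO" := by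
  induction rR with
  | nil => intro num; simp [solveLoop, chkR]
  | cons x t ih =>
    intro num
    simp only [List.length_cons, List.reverse_cons, solveLoop, List.isEmpty_nil,
      Bool.not_true, if_neg (by decide : ¬ (false = true)), List.getLast?_concat,
      List.dropLast_concat, chkR]
    by_cases h : x > num
    · simp [h]
    · simp [h, ih (num+1)]

lemma loopB (bR : List Int) : ∀ (rR : List Int) (num : Int),
    solveLoop (bR.length + rR.length) num bR.reverse rR.reverse =
      if chk num bR && chkR (num + bR.length) rR then "YES" else "NO" := by
  induction bR with
  | nil => intro rR num; simpa [chk] using loopR rR num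
  | cons x t ih =>
    intro rR num
    have hfuel : (x :: t).length + rR.length = (t.length + rR.length) + 1 := by
      simp [List.length_cons]; omega
    rw [hfuel]
    simp only [List.reverse_cons, solveLoop,
      List.getLastD_concat, List.dropLast_concat]
    rw [if_pos (by simp)]
    by_cases h : x < num
    · simp [h, chk]
    · have harith : num + ((x :: t).length : Int) = (num + 1) + (t.length : Int) := by
        omega
      rw [if_neg h, ih rR (num+1), harith]
      simp [chk, h]

lemma sorted_true_eq_reverse (xs : List Int) :
    PySem.List.sorted xs (fun x => x) true = (PySem.List.sorted xs (fun x => x) false).reverse := by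
  have h1 : PySem.List.sorted xs (fun x => x) false
      = (PySem.List.sorted xs (fun x => x) true).reverse := by
    apply PySem.List.sorted_id_eq_of_perm_of_pairwise
    · exact (List.reverse_perm _).trans (PySem.List.sorted_perm xs (fun x => x) true)
    · have := PySem.List.sorted_pairwise_rev (xs := xs) (key := fun x => x)
      simpa [List.pairwise_reverse] using this
  rw [h1, List.reverse_reverse]

lemma any_enum_lt (bs : List Int) : ∀ (num : Int),
    ((PySem.List.enumerate bs num).any (fun p => p.2 < p.1 + 1)) = !chk (num + 1) bs := by
  induction bs with
  | nil => intro num; simp [PySem.List.enumerate_nil, chk]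
  | cons x t ih =>
    intro num
    rw [PySem.List.enumerate_cons]
    simp only [List.any_cons, chk, ih (num+1), Bool.not_and, Bool.not_not]

lemma any_enum_gt (rs : List Int) (c : Int) : ∀ (num : Int),
    ((PySem.List.enumerate rs num).any (fun p => p.2 > c + p.1)) = !chkR (c + num) rs := by
  induction rs with
  | nil => intro num; simp [PySem.List.enumerate_nil, chkR]
  | cons x t ih =>
    intro num
    rw [PySem.List.enumerate_cons]
    simp only [List.any_cons, chkR, ih (num+1), Bool.not_and, Bool.not_not]
    have harith : c + (num + 1) = c + num + 1 := by ring
    rw [harith]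

lemma fold_split (pairs : List (Int × String)) :
    pairs.foldl
      (fun (p : List Int × List Int) nc =>
        if nc.2 == "B" then (p.1 ++ [nc.1], p.2) else (p.1, p.2 ++ [nc.1]))
      ([], [])
    = ((pairs.filter (fun p => p.2 == "B")).map Prod.fst,
       (pairs.filter (fun p => p.2 != "B")).map Prod.fst) := by
  have hfun : (fun (p : List Int × List Int) (nc : Int × String) =>
        if nc.2 == "B" then (p.1 ++ [nc.1], p.2) else (p.1, p.2 ++ [nc.1]))
      = (fun (p : List Int × List Int) (nc : Int × String) =>
        ((if nc.2 == "B" then p.1 ++ [nc.1] else p.1),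
         (if nc.2 != "B" then p.2 ++ [nc.1] else p.2))) := by
    funext p nc
    by_cases h : nc.2 = "B" <;> simp [h]
  rw [hfun,
    PySem.List.foldl_prod_mk
      (f := fun acc (nc : Int × String) => if nc.2 == "B" then acc ++ [nc.1] else acc)
      (g := fun acc (nc : Int × String) => if nc.2 != "B" then acc ++ [nc.1] else acc)]
  rw [PySem.List.foldl_append_if (p := fun nc : Int × String => nc.2 == "B") (f := Prod.fst),
      PySem.List.foldl_append_if (p := fun nc : Int × String => nc.2 != "B") (f := Prod.fst)]
  simp

-- ===== VERDICT (by name: the statement is the Claim_ definition above) =====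
theorem solve_spec : Claim_equal_solve := by
  intro arr colors _ hpre
  unfold Spec_solve solve solve_alt
  have hpre' : arr.length ≤ colors.length := hpre
  have hzip : (arr.zip colors).length = arr.length := by
    simp [List.length_zip]; omega
  rw [fold_split]
  set pairs := arr.zip colors with hpairs
  set bAsc := PySem.List.sorted ((pairs.filter (fun p => p.2 == "B")).map Prod.fst) (fun x => x) false with hb
  set rAsc := PySem.List.sorted ((pairs.filter (fun p => p.2 != "B")).map Prod.fst) (fun x => x) false with hr
  have hlen : arr.length = bAsc.length + rAsc.length := by
    rw [hb, hr]
    rw [PySem.List.length_sorted, PySem.List.length_sorted]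
    simp only [List.length_map]
    rw [← hzip]
    have := List.length_eq_length_filter_add (l := pairs) (fun p : Int × String => p.2 == "B")
    simpa [bne] using this
  simp only
  rw [sorted_true_eq_reverse, sorted_true_eq_reverse, ← hb, ← hr, hlen, loopB]
  
  rw [any_enum_lt bAsc 0, any_enum_gt rAsc ((bAsc.length : Int) + 1) 0]
  have h0 : (0 : Int) + 1 = 1 := by ring
  have h1 : ((bAsc.length : Int) + 1) + 0 = 1 + (bAsc.length : Int) := by ring
  rw [h0, h1]
  by_cases hB : chk 1 bAsc
  · by_cases hR : chkR (1 + (bAsc.length : Int)) rAsc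
    · simp [hB, hR]
    · simp [hB, hR]
  · simp [hB]
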